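-- pv_equiv track=rewrite | github.com/veeravenu19/GeeKsforGeeks | Difficulty: Basic/Number is sparse or not/number-is-sparse-or-not.py | isSparse
-- ===== SOURCE A (Python) =====
-- import math
-- import math
--
-- def isSparse(n):
--     #Your code here
--     if n==0:
--         return True
--     le = int(math.log2(n)+1)
--     for i in range(le):
--         if n&(1<<i) and n&(1<<i+1):
--             return False
--     return True
-- ===== SOURCE B (Python) =====
-- def isSparse(n):
--     return (n & (n >> 1)) == 0
-- ===== Notes on version B (the rewrite author's own statement) =====
-- stated objective: idiomatic
-- what changed: Replaces the per-bit-position loop (with a float log2 to get the bit length) by the single closed-form bit test (n & (n >> 1)) == 0.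
import Mathlib
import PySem

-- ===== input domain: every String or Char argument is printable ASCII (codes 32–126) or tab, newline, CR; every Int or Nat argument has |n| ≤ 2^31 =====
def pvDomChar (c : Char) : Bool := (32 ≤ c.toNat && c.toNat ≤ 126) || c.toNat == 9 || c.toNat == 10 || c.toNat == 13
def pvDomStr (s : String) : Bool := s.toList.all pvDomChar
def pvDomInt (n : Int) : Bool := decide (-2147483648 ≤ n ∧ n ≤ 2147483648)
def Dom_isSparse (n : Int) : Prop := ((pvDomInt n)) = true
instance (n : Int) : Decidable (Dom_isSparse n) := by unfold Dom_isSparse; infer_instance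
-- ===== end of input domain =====

-- B replaces A's per-bit-position loop by the single closed-form bit test (n & (n >> 1)) == 0 (idiomatic).

-- ===== PORT A =====
-- the for-loop over range(le): returns False as soon as bits i and i+1 are both set
def isSparseGo (m : Nat) : List Nat → Bool
  | [] => true
  | i :: rest =>
      if (m &&& (1 <<< i)) ≠ 0 ∧ (m &&& (1 <<< (i + 1))) ≠ 0 then false
      else isSparseGo m rest

def isSparse (n : Int) : Bool :=
  if n = 0 then true
  else
    let m := n.toNat
    -- le = int(math.log2(n) + 1); for 0 < n ≤ 2^31 double-precision log2 makes this exactly floor(log2 n) + 1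
    let le := Nat.log2 m + 1
    isSparseGo m (List.range le)

-- ===== PORT B =====
def isSparse_alt (n : Int) : Bool := decide (Int.land n (Int.shiftRight n 1) = 0)

-- ===== PRECONDITION & SPEC =====
-- Pre_ excludes negative n, on which A raises ValueError (math.log2 of a negative number).
def Pre_isSparse (n : Int) : Prop := 0 ≤ n
instance (n : Int) : Decidable (Pre_isSparse n) := by unfold Pre_isSparse; infer_instance
def pvWitness_isSparse : Int := (6)

def Spec_isSparse (n : Int) (out : Bool) : Prop := out = isSparse_alt n
instance (n : Int) (out : Bool) : Decidable (Spec_isSparse n out) := by unfold Spec_isSparse; infer_instance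

-- ===== CLAIM (what is proved, stated in full; the proofs are below) =====
def Claim_equal_isSparse : Prop := ∀ (n : Int), Dom_isSparse n → Pre_isSparse n → Spec_isSparse n (isSparse n)

-- ===== LEMMAS AND PROOFS =====

-- `n & (1 << i)` is truthy exactly when bit i of n is set
theorem land_one_shiftLeft_ne (m i : Nat) : (m &&& (1 <<< i)) ≠ 0 ↔ m.testBit i = true := by
  rw [Nat.one_shiftLeft, Nat.and_two_pow]
  cases h : m.testBit i <;> simp

theorem isSparseGo_true_iff (m : Nat) (l : List Nat) :
    isSparseGo m l = true ↔ ∀ i ∈ l, ¬(m.testBit i = true ∧ m.testBit (i + 1) = true) := by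
  induction l with
  | nil => simp [isSparseGo]
  | cons i rest ih =>
      by_cases h : (m &&& (1 <<< i)) ≠ 0 ∧ (m &&& (1 <<< (i + 1))) ≠ 0
      · simp only [isSparseGo, if_pos h]
        simp [land_one_shiftLeft_ne] at h
        simp [h]
      · simp only [isSparseGo, if_neg h, ih]
        rw [land_one_shiftLeft_ne, land_one_shiftLeft_ne] at h
        simp only [List.mem_cons]
        constructor
        · rintro hall i' (rfl | hi')
          · tauto
          · exact hall i' hi'
        · intro hall i' hi'; exact hall i' (Or.inr hi')

theorem testBit_high (m i : Nat) (h : Nat.log2 m + 1 ≤ i) : m.testBit i = false :=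
  Nat.testBit_lt_two_pow (Nat.lt_of_lt_of_le Nat.lt_log2_self (Nat.pow_le_pow_right (by norm_num) h))

theorem land_shiftRight_eq_zero_iff (m : Nat) :
    m &&& (m >>> 1) = 0 ↔ ∀ i, ¬(m.testBit i = true ∧ m.testBit (i + 1) = true) := by
  constructor
  · intro h i hi
    have := congrArg (fun x => x.testBit i) h
    simp [Nat.testBit_and, Nat.testBit_shiftRight, Nat.add_comm 1 i] at this
    exact absurd (this hi.1) (by simp [hi.2])
  · intro h
    apply Nat.eq_of_testBit_eq
    intro i
    simp only [Nat.testBit_and, Nat.testBit_shiftRight, Nat.zero_testBit]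
    have := h i
    by_cases hb : m.testBit i = true
    · simp only [hb, Bool.true_and]
      rw [Nat.add_comm 1 i]
      simpa [hb] using this
    · simp [Bool.eq_false_iff.mpr hb]

-- ===== VERDICT (by name: the statement is the Claim_ definition above) =====
theorem key_isSparse (m : Nat) :
    isSparseGo m (List.range (Nat.log2 m + 1)) = decide ((m &&& (m >>> 1)) = 0) := by
  by_cases hq : (m &&& (m >>> 1)) = 0
  · rw [decide_eq_true hq, isSparseGo_true_iff]
    have := (land_shiftRight_eq_zero_iff m).mp hq
    intro i _
    exact this i
  · rw [decide_eq_false hq, ← Bool.not_eq_true, isSparseGo_true_iff]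
    rw [land_shiftRight_eq_zero_iff] at hq
    push Not at hq
    obtain ⟨i, h1, h2⟩ := hq
    intro hall
    have hi : i ∈ List.range (Nat.log2 m + 1) := by
      rw [List.mem_range]
      by_contra hlt
      push Not at hlt
      exact absurd h1 (by simp [testBit_high m i hlt])
    exact (hall i hi) ⟨h1, h2⟩

theorem isSparse_spec : Claim_equal_isSparse := by
  intro n _ hpre
  unfold Spec_isSparse
  obtain ⟨m, rfl⟩ := Int.eq_ofNat_of_zero_le hpre
  show isSparse (Int.ofNat m) = isSparse_alt (Int.ofNat m)
  have halt : isSparse_alt (Int.ofNat m) = decide ((m &&& (m >>> 1)) = 0) := by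
    unfold isSparse_alt
    rw [show Int.land (Int.ofNat m) (Int.shiftRight (Int.ofNat m) 1) = Int.ofNat (m &&& (m >>> 1)) from rfl]
    simp
  rw [halt]
  by_cases hz : (Int.ofNat m) = 0
  · have hm0 : m = 0 := Int.ofNat_eq_zero.mp hz
    subst hm0
    simp [isSparse]
  · unfold isSparse
    rw [if_neg hz]
    exact key_isSparse m
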